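-- pv_equiv track=rewrite | github.com/kkr010128/codebert | problem113/problem113_136.py | func
-- ===== SOURCE A (Python) =====
-- def func(s, x):
--     last = [0] * 26
--     score = 0
--     for i, v in enumerate(x, 1):
--         last[v] = i
--         c = 0
--         for j in range(26):
--             c += s[j] * (i - last[j])
--         score += s[i * 26 + v] - c
--     return score
-- ===== SOURCE B (Python) =====
-- def func(s, x):
--     totalS = sum(s[:26])
--     last = [0] * 26
--     W = 0
--     score = 0
--     for i, v in enumerate(x, 1):
--         W += s[v] * (i - last[v])
--         last[v] = i
--         score += s[i * 26 + v] - (i * totalS - W)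
--     return score
-- ===== Notes on version B (the rewrite author's own statement) =====
-- stated objective: faster
-- what changed: Replaces A's inner 26-element rescan per step by a running weighted sum W = sum_j s[j]*last[j] updated incrementally, so each step is O(1) instead of O(26).
import Mathlib
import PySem

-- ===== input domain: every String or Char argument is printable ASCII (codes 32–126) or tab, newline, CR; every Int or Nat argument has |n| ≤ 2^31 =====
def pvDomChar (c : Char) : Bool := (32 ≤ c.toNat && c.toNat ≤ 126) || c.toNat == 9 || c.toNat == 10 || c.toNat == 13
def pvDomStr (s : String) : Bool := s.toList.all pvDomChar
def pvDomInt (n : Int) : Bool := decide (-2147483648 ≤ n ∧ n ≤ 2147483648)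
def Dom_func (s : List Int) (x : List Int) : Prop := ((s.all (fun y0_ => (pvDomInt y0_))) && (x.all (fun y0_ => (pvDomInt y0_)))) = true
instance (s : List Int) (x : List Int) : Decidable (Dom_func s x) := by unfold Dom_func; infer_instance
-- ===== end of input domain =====

-- B replaces A's inner 26-element rescan by a running weighted sum W updated
-- incrementally, so each step of the loop over x is O(1) instead of O(26).

-- ===== PORT A =====
def funcStep (s : List Int) (st : List Int × Int) (p : Int × Int) : List Int × Int :=
  let last := PySem.List.pySetD st.1 p.2 p.1
  let c := (PySem.List.pyRange 0 26).foldl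
    (fun c j => c + PySem.List.pyGetD s j 0 * (p.1 - PySem.List.pyGetD last j 0)) 0
  (last, st.2 + (PySem.List.pyGetD s (p.1 * 26 + p.2) 0 - c))

def func (s : List Int) (x : List Int) : Int :=
  ((PySem.List.enumerate x 1).foldl (funcStep s) (List.replicate 26 0, 0)).2

-- ===== PORT B =====
def funcAltStep (s : List Int) (totalS : Int) (st : List Int × Int × Int)
    (p : Int × Int) : List Int × Int × Int :=
  let W := st.2.1 + PySem.List.pyGetD s p.2 0 * (p.1 - PySem.List.pyGetD st.1 p.2 0)
  let last := PySem.List.pySetD st.1 p.2 p.1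
  (last, W, st.2.2 + (PySem.List.pyGetD s (p.1 * 26 + p.2) 0 - (p.1 * totalS - W)))

def func_alt (s : List Int) (x : List Int) : Int :=
  let totalS := (PySem.List.slice s none (some 26)).sum
  ((PySem.List.enumerate x 1).foldl (funcAltStep s totalS) (List.replicate 26 0, 0, 0)).2.2

-- ===== PRECONDITION & SPEC =====
-- Pre_ excludes inputs on which Python A raises an IndexError (a value of x outside
-- [0, 26) reaching last[v] or s[i*26+v], or s too short for the accessed indices), and
-- also excludes negative values of x in [-26, 0), where A returns a value that depends
-- on Python's accidental negative-index wraparound in last[v].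
def Pre_func (s : List Int) (x : List Int) : Prop :=
  (∀ v ∈ x, 0 ≤ v ∧ v < 26) ∧
  (∀ k, k < x.length → 26 * ((k : Int) + 1) + x.getD k 0 < (s.length : Int))
instance (s : List Int) (x : List Int) : Decidable (Pre_func s x) := by
  unfold Pre_func; infer_instance

def pvWitness_func : List Int × List Int :=
  ([3, 0, 7, 4, 1, 8, 5, 2, 9, 6, 3, 0, 7, 4, 1, 8, 5, 2, 9, 6, 3, 0, 7, 4, 1, 8, 5, 2, 9, 6, 3, 0, 7, 4, 1, 8, 5, 2, 9, 6, 3, 0, 7, 4, 1, 8, 5, 2, 9, 6, 3, 0, 7, 4, 1, 8, 5, 2, 9, 6, 3, 0, 7, 4, 1, 8, 5, 2, 9, 6, 3, 0, 7, 4, 1, 8, 5, 2, 9, 6, 3, 0, 7, 4, 1, 8, 5, 2, 9, 6, 3, 0, 7, 4, 1, 8, 5, 2, 9, 6, 3, 0, 7, 4],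
   [2, 25, 0])

def Spec_func (s : List Int) (x : List Int) (out : Int) : Prop := out = func_alt s x
instance (s : List Int) (x : List Int) (out : Int) : Decidable (Spec_func s x out) := by
  unfold Spec_func; infer_instance

-- ===== CLAIM (what is proved, stated in full; the proofs are below) =====
def Claim_equal_func : Prop :=
  ∀ (s : List Int) (x : List Int), Dom_func s x → Pre_func s x → Spec_func s x (func s x)

-- ===== LEMMAS AND PROOFS =====

-- weighted sum maintained by B: sum over j < 26 of s[j] * lst[j]
def wsum (s lst : List Int) : Int :=
  ((List.range 26).map (fun j => s.getD j 0 * lst.getD j 0)).sum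

-- sum over a range of s[j]*(i - L[j]) splits into i * (sum of s) minus the weighted sum
theorem sum_mul_sub (S L : Nat → Int) (i : Int) : ∀ (n : Nat),
    ((List.range n).map (fun j => S j * (i - L j))).sum
      = i * ((List.range n).map S).sum - ((List.range n).map (fun j => S j * L j)).sum := by
  intro n
  induction n with
  | zero => simp
  | succ m ih => simp [List.range_succ, ih]; ring

-- sum over range m of s.getD equals sum of the first m elements (extra getD terms are 0)
theorem sum_getD_eq_take (s : List Int) : ∀ (m : Nat),
    ((List.range m).map (fun j => s.getD j 0)).sum = (s.take m).sum := by
  intro m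
  induction m with
  | zero => simp
  | succ k ih =>
    rw [List.range_succ, List.take_succ]
    simp only [List.map_append, List.sum_append, ih, List.map_cons, List.map_nil]
    by_cases h : k < s.length
    · simp [List.getD, List.getElem?_eq_getElem h]
    · simp [List.getD, List.getElem?_eq_none (Nat.le_of_not_lt h)]

-- updating one slot shifts the weighted sum by S n * (i - old value)
theorem wsum_set_aux (i : Int) : ∀ (lst : List Int) (S : Nat → Int) (n : Nat),
    n < lst.length →
    ((List.range lst.length).map (fun j => S j * ((lst.set n i).getD j 0))).sum
      = ((List.range lst.length).map (fun j => S j * lst.getD j 0)).sum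
        + S n * (i - lst.getD n 0) := by
  intro lst
  induction lst with
  | nil => intro S n h; simp at h
  | cons a t ih =>
    intro S n h
    cases n with
    | zero =>
      simp only [List.set_cons_zero, List.length_cons, List.range_succ_eq_map,
        List.map_cons, List.sum_cons, List.map_map]
      simp only [Function.comp_def, List.getD_cons_zero, List.getD_cons_succ]
      ring
    | succ m =>
      simp only [List.set_cons_succ, List.length_cons, List.range_succ_eq_map,
        List.map_cons, List.sum_cons, List.map_map]
      simp only [Function.comp_def, List.getD_cons_zero, List.getD_cons_succ]
      rw [ih (fun k => S (k + 1)) m (by simpa using h)]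
      ring

theorem wsum_set (s lst : List Int) (i : Int) (n : Nat) (hlen : lst.length = 26)
    (hn : n < 26) :
    wsum s (lst.set n i) = wsum s lst + s.getD n 0 * (i - lst.getD n 0) := by
  unfold wsum
  have := wsum_set_aux i lst (fun j => s.getD j 0) n (by omega)
  rw [hlen] at this
  exact this

-- A's inner-loop rescan equals i * totalS - (updated weighted sum)
theorem rescan_eq (s lst : List Int) (i : Int) (n : Nat) :
    ((PySem.List.pyRange 0 26).foldl
      (fun c j => c + PySem.List.pyGetD s j 0 * (i - PySem.List.pyGetD (lst.set n i) j 0)) 0)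
      = i * (s.take 26).sum - wsum s (lst.set n i) := by
  rw [PySem.List.foldl_add]
  have h26 : (26 : Int) = ((26 : Nat) : Int) := by norm_num
  rw [h26, PySem.List.pyRange_zero_nat, List.map_map]
  simp only [Function.comp_def, PySem.List.pyGetD_natCast]
  rw [sum_mul_sub (fun j => s.getD j 0) (fun j => (lst.set n i).getD j 0) i 26,
      sum_getD_eq_take s 26]
  unfold wsum
  ring

-- the main loop invariant: from equal states (with B's W the weighted sum of last),
-- both folds produce the same last array and the same score
theorem loop_eq (s : List Int) (x : List Int) :
    ∀ (i0 : Int) (last : List Int) (sc : Int),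
      last.length = 26 → (∀ v ∈ x, 0 ≤ v ∧ v < 26) →
      (PySem.List.enumerate x i0).foldl (funcAltStep s ((s.take 26).sum))
          (last, wsum s last, sc)
        = (((PySem.List.enumerate x i0).foldl (funcStep s) (last, sc)).1,
           wsum s ((PySem.List.enumerate x i0).foldl (funcStep s) (last, sc)).1,
           ((PySem.List.enumerate x i0).foldl (funcStep s) (last, sc)).2) := by
  induction x with
  | nil => intro i0 last sc _ _; simp [PySem.List.enumerate_nil]
  | cons v t ih =>
    intro i0 last sc hlen hx
    obtain ⟨hv0, hv26⟩ := hx v List.mem_cons_self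
    set n : Nat := v.toNat with hn
    have hvn : v = (n : Int) := by omega
    have hn26 : n < 26 := by omega
    rw [PySem.List.enumerate_cons]
    simp only [List.foldl_cons]
    have hstep :
        funcAltStep s ((s.take 26).sum) (last, wsum s last, sc) (i0, v)
          = ((funcStep s (last, sc) (i0, v)).1,
             wsum s (funcStep s (last, sc) (i0, v)).1,
             (funcStep s (last, sc) (i0, v)).2) := by
      unfold funcStep funcAltStep
      simp only [hvn, PySem.List.pySetD_natCast, PySem.List.pyGetD_natCast]
      rw [rescan_eq s last i0 n,
          wsum_set s last i0 n hlen hn26]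
    rw [hstep]
    exact ih (i0 + 1) (funcStep s (last, sc) (i0, v)).1 (funcStep s (last, sc) (i0, v)).2
      (by unfold funcStep; simp [PySem.List.length_pySetD, hlen])
      (fun w hw => hx w (List.mem_cons_of_mem v hw))

-- ===== VERDICT (by name: the statement is the Claim_ definition above) =====
theorem func_spec : Claim_equal_func := by
  intro s x _ hpre
  unfold Spec_func func func_alt
  have hrep : ∀ j : Nat, (List.replicate 26 (0 : Int)).getD j 0 = 0 := by
    intro j
    rw [List.getD_eq_getElem?_getD, List.getElem?_replicate]
    split <;> rfl
  have h0 : wsum s (List.replicate 26 (0 : Int)) = 0 := by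
    unfold wsum
    apply List.sum_eq_zero
    intro y hy
    obtain ⟨j, -, rfl⟩ := List.mem_map.mp hy
    rw [hrep j, mul_zero]
  have hmain := loop_eq s x 1 (List.replicate 26 0) 0 (by simp) hpre.1
  rw [h0] at hmain
  simp only [PySem.List.slice_to s (by norm_num : (0:Int) ≤ 26)]
  rw [show ((26:Int).toNat) = 26 from rfl, hmain]
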